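-- pv_equiv track=rewrite | github.com/bnonni/Python | 1_Fundamentals/Strings/trim/trim.py | trimmest
-- ===== SOURCE A (Python) =====
-- def trimmest(string):
--     stack = []
--     trimmed = ''
--     for i, c in enumerate(string):
--         if(c != ' '):
--             first = i
--             break
--
--     for i, c in enumerate(string[first:]):
--         stack.append(c)
--
--     j = len(stack) - 1
--     for i in range(j):
--         if(stack[j] == ' '):
--             stack.pop(j)
--             j -= 1
--
--     for i in stack:
--         trimmed += i
--
--     return trimmed, stack
-- ===== SOURCE B (Python) =====
-- def trimmest(string):
--     result = string.strip(' ')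
--     return result, list(result)
-- ===== Notes on version B (the rewrite author's own statement) =====
-- stated objective: faster
-- what changed: Replaces A's four interpreted loops (scan for first non-space, element-copy loop, repeated pop of trailing spaces, string-concatenation join loop) with a single C-level str.strip(' ') call plus list().
-- crash fix: On strings containing no non-space character (empty or all spaces) A raises NameError/UnboundLocalError ('first' unbound); B returns ('', []). — e.g. on trimmest(" "): A raises UnboundLocalError, B returns ("", [])
import Mathlib
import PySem

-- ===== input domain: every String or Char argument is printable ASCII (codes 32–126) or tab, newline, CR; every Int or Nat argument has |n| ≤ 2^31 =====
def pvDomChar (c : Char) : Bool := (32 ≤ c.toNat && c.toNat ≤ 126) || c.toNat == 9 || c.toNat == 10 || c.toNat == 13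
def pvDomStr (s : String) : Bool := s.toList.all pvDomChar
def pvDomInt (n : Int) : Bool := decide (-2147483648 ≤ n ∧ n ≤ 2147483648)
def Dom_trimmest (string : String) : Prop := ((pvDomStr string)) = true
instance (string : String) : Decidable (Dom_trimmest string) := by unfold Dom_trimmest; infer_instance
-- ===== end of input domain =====

-- B replaces A's four loops (find first non-space, copy loop, pop-trailing-spaces loop, join loop) with one strip(' ') call plus list(); A raises NameError on all-space input, B returns ('', []).


-- ===== PORT A =====
-- A's first loop: enumerate with break, recording the index of the first char ≠ ' ' (none ⇒ NameError in Python)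
def trimFirst : List Char → Nat → Option Nat
  | [], _ => none
  | c :: rest, i => if c ≠ ' ' then some i else trimFirst rest (i + 1)

-- one iteration of A's third loop; the `none` arm is unreachable (the guard just saw the element at that index)
def trimStep (s : List String × Int) : List String × Int :=
  if PySem.List.pyGet? s.1 s.2 = some " " then
    match PySem.List.pop? s.1 s.2 with
    | some (_, rest) => (rest, s.2 - 1)
    | none => s
  else s

def trimmest (string : String) : String × List String :=
  match trimFirst string.toList 0 with
  | none => ("", [])   -- Python raises NameError here (excluded by Pre_)
  | some first =>
    let stack := (PySem.Str.slice string (some (first : Int)) none).toList.foldl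
      (fun st c => st ++ [String.ofList [c]]) []
    let p := (PySem.List.pyRange 0 ((stack.length : Int) - 1) 1).foldl (fun s _ => trimStep s)
      (stack, (stack.length : Int) - 1)
    (p.1.foldl (fun acc s => acc ++ s) "", p.1)

-- ===== PORT B =====
def trimmest_alt (string : String) : String × List String :=
  let result := PySem.Str.stripChars string " "
  (result, result.toList.map (fun c => String.ofList [c]))

-- ===== PRECONDITION & SPEC =====
-- Pre_ excludes exactly the strings with no non-space character (empty or all ' '), on which A raises NameError.
def Pre_trimmest (string : String) : Prop := (string.toList.any (fun c => c != ' ')) = true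
instance (string : String) : Decidable (Pre_trimmest string) := by unfold Pre_trimmest; infer_instance
def pvWitness_trimmest : String := " a b "

def Spec_trimmest (string : String) (out : String × List String) : Prop := out = trimmest_alt string
instance (string : String) (out : String × List String) : Decidable (Spec_trimmest string out) := by unfold Spec_trimmest; infer_instance

-- On strings containing no non-space character (empty or all ' ') A raises NameError ('first' unbound); B returns ("", []).
def Raises_trimmest (string : String) : Prop := (string.toList.all (fun c => c == ' ')) = true
instance (string : String) : Decidable (Raises_trimmest string) := by unfold Raises_trimmest; infer_instance
def pvRaiseWitness_trimmest : String := " "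
def pvRaiseWitnessOut_trimmest : String × List String := ("", [])

-- ===== CLAIM (what is proved, stated in full; the proofs are below) =====
def Claim_equal_trimmest : Prop := ∀ (string : String), Dom_trimmest string → Pre_trimmest string → Spec_trimmest string (trimmest string)
def Claim_raises_trimmest : Prop := (∀ (string : String), Dom_trimmest string → Raises_trimmest string → ¬ Pre_trimmest string) ∧ (Dom_trimmest (pvRaiseWitness_trimmest) ∧ Raises_trimmest (pvRaiseWitness_trimmest) ∧ trimmest_alt (pvRaiseWitness_trimmest) = pvRaiseWitnessOut_trimmest)

-- ===== LEMMAS AND PROOFS =====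

theorem trimFirst_spec (l : List Char) (i : Nat) (h : ∃ c ∈ l, ¬ c = ' ') :
    trimFirst l i = some (i + (l.takeWhile (fun c => c == ' ')).length) := by
  induction l generalizing i with
  | nil => simp at h
  | cons c rest ih =>
    by_cases hc : c = ' '
    · subst hc
      have h' : ∃ c ∈ rest, ¬ c = ' ' := by
        obtain ⟨d, hd, hne⟩ := h
        rcases List.mem_cons.mp hd with rfl | hd'
        · exact absurd rfl hne
        · exact ⟨d, hd', hne⟩
      simp [trimFirst, ih _ h']
      omega
    · simp [trimFirst, hc]

theorem loop_eval (L : List Int) (st : List String)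
    (h : (st.reverse.takeWhile (fun s => s == " ")).length ≤ L.length) :
    L.foldl (fun s _ => trimStep s) (st, (st.length : Int) - 1)
      = ((st.reverse.dropWhile (fun s => s == " ")).reverse,
         (((st.reverse.dropWhile (fun s => s == " ")).reverse.length : Int) - 1)) := by
  induction L generalizing st with
  | nil =>
    simp only [List.length_nil, Nat.le_zero, List.length_eq_zero_iff] at h
    have hd : st.reverse.dropWhile (fun s => s == " ") = st.reverse := by
      rcases hrev : st.reverse with _ | ⟨z, r⟩
      · simp
      · rw [hrev] at h
        rw [List.takeWhile_cons] at h
        by_cases hz : (z == " ") = true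
        · simp [hz] at h
        · simp only [List.dropWhile_cons]
          simp [hz]
    simp [hd]
  | cons a L' ih =>
    rcases hrev : st.reverse with _ | ⟨z, r⟩
    · have hst : st = [] := by simpa using congrArg List.reverse hrev
      subst hst
      simp only [List.foldl_cons]
      have hts : trimStep ([], ((List.length ([] : List String) : Int) - 1)) = ([], -1) := by
        simp [trimStep, PySem.List.pyGet?]
      simp only [List.length_nil, Nat.cast_zero, zero_sub] at hts ⊢
      rw [hts]
      have := ih [] (by simp)
      simpa using this
    · have hst : st = r.reverse ++ [z] := by
        have := congrArg List.reverse hrev; simpa using this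
      subst hst
      have hidx : ((r.reverse ++ [z]).length : Int) - 1 = ((r.length : Nat) : Int) := by
        simp
      have hget : PySem.List.pyGet? (r.reverse ++ [z]) ((r.length : Nat) : Int) = some z := by
        rw [PySem.List.pyGet?_natCast]
        rw [show r.length = (r.reverse ++ [z]).length - 1 by simp]
        simp
      by_cases hz : z = " "
      · subst hz
        have hpop : PySem.List.pop? (r.reverse ++ [" "]) ((r.length : Nat) : Int)
            = some (" ", r.reverse) := by
          rw [PySem.List.pop?_natCast _ _ (by simp)]
          congr 1
          refine Prod.ext ?_ ?_
          · show (r.reverse ++ [" "])[r.length] = " "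
            simp [List.getElem_append_right (by simp : r.reverse.length ≤ r.length)]
          · show (r.reverse ++ [" "]).eraseIdx r.length = r.reverse
            rw [List.eraseIdx_eq_dropLast (by simp)]
            simp
        have hts : trimStep (r.reverse ++ [" "], ((r.length : Nat) : Int))
            = (r.reverse, ((r.length : Nat) : Int) - 1) := by
          simp [trimStep, hpop]
        simp only [List.foldl_cons, hidx, hts]
        have hh : (r.reverse.reverse.takeWhile (fun s => s == " ")).length ≤ L'.length := by
          simp only [List.reverse_reverse]
          rw [hrev] at h
          simp at h
          omega
        have hih := ih r.reverse hh
        simp only [List.reverse_reverse, List.length_reverse] at hih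
        rw [hih]
        simp only [List.dropWhile_cons]
        simp
      · have hts : trimStep (r.reverse ++ [z], ((r.length : Nat) : Int))
            = (r.reverse ++ [z], ((r.length : Nat) : Int)) := by
          unfold trimStep
          simp only [hget]
          simp [hz]
        simp only [List.foldl_cons, hidx, hts]
        have hh : ((r.reverse ++ [z]).reverse.takeWhile (fun s => s == " ")).length ≤ L'.length := by
          rw [hrev]
          rw [List.takeWhile_cons]
          simp [hz]
        have hih := ih (r.reverse ++ [z]) hh
        rw [hidx] at hih
        rw [hih, hrev]

theorem sg_ne_space (c : Char) (hc : ¬ c = ' ') : ¬ String.ofList [c] = " " := by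
  intro h
  have := congrArg String.toList h
  simp [String.toList_ofList] at this
  exact hc this

theorem sg_beq_space : (fun c => (String.ofList [c] == " ")) = (fun c : Char => c == ' ') := by
  funext c
  by_cases hc : c = ' '
  · simp [hc]
  · simp [hc, sg_ne_space c hc]

theorem contains_space : (fun c => ([' '] : List Char).contains c) = (fun c : Char => c == ' ') := by
  funext c
  by_cases hc : c = ' ' <;> simp [hc]

theorem drop_takeWhile (p : Char → Bool) (l : List Char) :
    List.drop (l.takeWhile p).length l = l.dropWhile p := by
  induction l with
  | nil => simp
  | cons c cs ih => by_cases hc : p c <;> simp [hc, ih]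

theorem foldl_build (xs : List Char) (a : List String) :
    xs.foldl (fun st c => st ++ [String.ofList [c]]) a = a ++ xs.map (fun c => String.ofList [c]) := by
  induction xs generalizing a with
  | nil => simp
  | cons c cs ih => simp [ih]

theorem str_app (s t : String) : s ++ t = String.ofList (s.toList ++ t.toList) := by
  rw [← String.toList_append, String.ofList_toList]

theorem foldl_join (cs : List Char) (a : String) :
    (cs.map (fun c => String.ofList [c])).foldl (fun acc s => acc ++ s) a = a ++ String.ofList cs := by
  induction cs generalizing a with
  | nil => simp
  | cons c cs ih =>
    simp only [List.map_cons, List.foldl_cons, ih]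
    have hinj : ∀ x y : String, x.toList = y.toList → x = y := by
      intro x y h
      rw [← String.ofList_toList (s := x), h, String.ofList_toList]
    apply hinj
    simp [String.toList_append, String.toList_ofList]

theorem pyRange_len (n : Nat) : (PySem.List.pyRange 0 (n : Int) 1).length = n := by
  unfold PySem.List.pyRange
  split
  · omega
  · split
    · simp; omega
    · simp; omega

-- ===== VERDICT (by name: the statement is the Claim_ definition above) =====
theorem trimmest_spec : Claim_equal_trimmest := by
  intro s _ hp
  unfold Spec_trimmest trimmest trimmest_alt
  have hex : ∃ c ∈ s.toList, ¬ c = ' ' := by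
    unfold Pre_trimmest at hp
    simpa using hp
  rw [trimFirst_spec s.toList 0 hex]
  simp only [Nat.zero_add]
  set p : Char → Bool := fun c => c == ' ' with hpdef
  set m : List Char := s.toList.dropWhile p with hmdef
  have hslice : (PySem.Str.slice s (some (((s.toList.takeWhile p).length : Nat) : Int)) none).toList = m := by
    rw [PySem.Str.toList_slice, PySem.Chars.slice_eq_listSlice, PySem.List.slice_from_natCast]
    exact drop_takeWhile p s.toList
  rw [hslice, foldl_build]
  simp only [List.nil_append]
  have hm : m ≠ [] := by
    intro h
    rw [hmdef, List.dropWhile_eq_nil_iff] at h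
    obtain ⟨c, hc, hne⟩ := hex
    have := h c hc
    rw [hpdef] at this
    simp at this
    exact hne this
  have hhead : p (m.head hm) = false := List.head_dropWhile_not p hm
  have hmapstack : ((m.map (fun c => String.ofList [c])).reverse)
      = m.reverse.map (fun c => String.ofList [c]) := by simp
  have hcomp : ((fun s => s == " ") ∘ fun c : Char => String.ofList [c]) = p := by
    rw [hpdef]
    funext c
    exact congrFun sg_beq_space c
  have htake : (m.map (fun c => String.ofList [c])).reverse.takeWhile (fun s => s == " ")
      = (m.reverse.takeWhile p).map (fun c => String.ofList [c]) := by
    rw [hmapstack, List.takeWhile_map, hcomp]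
  have hdrop : (m.map (fun c => String.ofList [c])).reverse.dropWhile (fun s => s == " ")
      = (m.reverse.dropWhile p).map (fun c => String.ofList [c]) := by
    rw [hmapstack, List.dropWhile_map, hcomp]
  have hlt : (m.reverse.takeWhile p).length < m.length := by
    have hle : (m.reverse.takeWhile p).length ≤ m.length := by
      calc (m.reverse.takeWhile p).length ≤ m.reverse.length := (List.takeWhile_prefix p).length_le
      _ = m.length := by simp
    rcases lt_or_eq_of_le hle with h | h
    · exact h
    · exfalso
      have hpre := List.takeWhile_prefix (p := p) (l := m.reverse)
      have heq : m.reverse.takeWhile p = m.reverse := hpre.eq_of_length (by simp [h])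
      have hall := List.takeWhile_eq_self_iff.mp heq
      have hmem : m.head hm ∈ m.reverse := by
        rw [List.mem_reverse]
        exact List.head_mem hm
      rw [hall _ hmem] at hhead
      exact absurd hhead (by simp)
  have hstop : ((m.map (fun c => String.ofList [c])).length : Int) - 1 = ((m.length - 1 : Nat) : Int) := by
    have : 1 ≤ m.length := List.length_pos_of_ne_nil hm
    simp only [List.length_map]
    omega
  rw [loop_eval _ _ (by
    rw [hstop, pyRange_len, htake]
    simp only [List.length_map]
    omega)]
  rw [hdrop]
  simp only [← List.map_reverse]
  have hB : (PySem.Str.stripChars s " ").toList = (m.reverse.dropWhile p).reverse := by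
    rw [PySem.Str.toList_stripChars]
    show PySem.Chars.stripChars s.toList [' '] = _
    unfold PySem.Chars.stripChars
    rw [contains_space, ← hpdef]
  refine Prod.ext ?_ ?_
  · show ((m.reverse.dropWhile p).reverse.map (fun c => String.ofList [c])).foldl
      (fun acc s => acc ++ s) "" = PySem.Str.stripChars s " "
    rw [foldl_join]
    rw [show ("" : String) ++ String.ofList (m.reverse.dropWhile p).reverse
        = String.ofList (m.reverse.dropWhile p).reverse by
      rw [str_app]; simp]
    rw [← hB, String.ofList_toList]
  · show (m.reverse.dropWhile p).reverse.map (fun c => String.ofList [c])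
      = (PySem.Str.stripChars s " ").toList.map (fun c => String.ofList [c])
    rw [hB]

def trimmest_raises : Claim_raises_trimmest := by
  unfold Claim_raises_trimmest
  constructor
  · intro s _ hr hp
    unfold Raises_trimmest at hr
    unfold Pre_trimmest at hp
    simp [List.all_eq_true, List.any_eq_true] at hr hp
    obtain ⟨c, hc, hne⟩ := hp
    exact hne (hr c hc)
  · exact ⟨by decide, by decide, by decide⟩
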